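-- pv_equiv track=rewrite | github.com/ebelova-pppl/NOVA_modes | src/mode_csv.py | _infer_label_idx
-- ===== SOURCE A (Python) =====
-- LABEL_VALUE_NAMES = frozenset({"good", "bad", "g", "b", "skip", "s"})
--
-- def _infer_label_idx(data_rows: list[list[str]], path_idx: int, sample_size: int = 20) -> int | None:
--     sample = data_rows[:sample_size]
--     max_width = max((len(row) for row in sample), default=0)
--
--     for col_idx in range(max_width):
--         if col_idx == path_idx:
--             continue
--
--         values = [
--             row[col_idx].strip().lower()
--             for row in sample
--             if col_idx < len(row) and row[col_idx].strip()
--         ]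
--         if values and all(value in LABEL_VALUE_NAMES for value in values):
--             return col_idx
--
--     return None
-- ===== SOURCE B (Python) =====
-- LABEL_VALUE_NAMES = frozenset({"good", "bad", "g", "b", "skip", "s"})
--
-- def _infer_label_idx(data_rows, path_idx, sample_size=20):
--     # Single row-major pass: maintain per-column (valid, has_value) state.
--     sample = data_rows[:sample_size]
--     max_width = max((len(row) for row in sample), default=0)
--     valid = [True] * max_width
--     has_value = [False] * max_width
--     for row in sample:
--         for col, cell in enumerate(row):
--             s = cell.strip()
--             if s:
--                 has_value[col] = True
--                 if s.lower() not in LABEL_VALUE_NAMES: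
--                     valid[col] = False
--     for col in range(max_width):
--         if col != path_idx and has_value[col] and valid[col]:
--             return col
--     return None
-- ===== Notes on version B (the rewrite author's own statement) =====
-- stated objective: alternative
-- what changed: Column-major scanning (rebuilding the per-column value list for each column) is replaced by one row-major pass that maintains per-column (valid, has_value) flags, followed by a single scan over the columns.
import Mathlib
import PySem

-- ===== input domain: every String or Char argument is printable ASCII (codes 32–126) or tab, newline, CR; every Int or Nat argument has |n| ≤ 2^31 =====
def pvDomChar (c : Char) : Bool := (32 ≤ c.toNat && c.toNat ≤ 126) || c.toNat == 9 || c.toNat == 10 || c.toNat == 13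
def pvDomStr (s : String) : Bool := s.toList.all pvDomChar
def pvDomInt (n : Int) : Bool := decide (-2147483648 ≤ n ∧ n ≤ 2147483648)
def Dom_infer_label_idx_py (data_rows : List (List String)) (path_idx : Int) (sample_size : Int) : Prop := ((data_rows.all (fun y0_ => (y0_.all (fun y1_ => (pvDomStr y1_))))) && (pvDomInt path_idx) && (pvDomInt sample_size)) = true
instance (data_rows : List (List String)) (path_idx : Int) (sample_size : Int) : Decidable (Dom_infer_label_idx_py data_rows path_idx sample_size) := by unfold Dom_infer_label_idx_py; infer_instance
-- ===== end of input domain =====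

-- B replaces per-column rescans by one row-major pass with per-column flags (alternative decomposition).
-- ===== PORT A =====
def labelNames : List String := ["good", "bad", "g", "b", "skip", "s"]

def aValues (sample : List (List String)) (c : Nat) : List String :=
  sample.filterMap (fun row =>
    if c < row.length then
      let s := PySem.Str.strip (row.getD c "")
      if s ≠ "" then some (PySem.Str.lower s) else none
    else none)

def aScan (sample : List (List String)) (path_idx : Int) : List Nat → Option Int
  | [] => none
  | c :: rest =>
    if (c : Int) = path_idx then aScan sample path_idx rest
    else
      let values := aValues sample c
      if !values.isEmpty && values.all (fun v => labelNames.contains v) then some (c : Int)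
      else aScan sample path_idx rest

def infer_label_idx_py (data_rows : List (List String)) (path_idx : Int) (sample_size : Int) : Option Int :=
  let sample := PySem.List.slice data_rows none (some sample_size)
  let max_width := sample.foldl (fun m row => max m row.length) 0
  aScan sample path_idx (List.range max_width)

-- ===== PORT B =====
def bStep (p : Bool × Bool) (cell : String) : Bool × Bool :=
  let s := PySem.Str.strip cell
  if s = "" then p
  else (p.1 && labelNames.contains (PySem.Str.lower s), true)

def bRow (st : List (Bool × Bool)) (i : Nat) : List String → List (Bool × Bool)
  | [] => st
  | cell :: rest => bRow (st.set i (bStep (st.getD i (true, false)) cell)) (i + 1) rest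

def bFind (path_idx : Int) (i : Nat) : List (Bool × Bool) → Option Int
  | [] => none
  | (vld, hv) :: rest =>
    if ((i : Int) != path_idx) && hv && vld then some (i : Int)
    else bFind path_idx (i + 1) rest

def infer_label_idx_py_alt (data_rows : List (List String)) (path_idx : Int) (sample_size : Int) : Option Int :=
  let sample := PySem.List.slice data_rows none (some sample_size)
  let max_width := sample.foldl (fun m row => max m row.length) 0
  let st := sample.foldl (fun st row => bRow st 0 row) (List.replicate max_width (true, false))
  bFind path_idx 0 st

-- ===== PRECONDITION & SPEC =====
def Spec_infer_label_idx_py (data_rows : List (List String)) (path_idx : Int) (sample_size : Int) (out : Option Int) : Prop := out = infer_label_idx_py_alt data_rows path_idx sample_size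
instance (data_rows : List (List String)) (path_idx : Int) (sample_size : Int) (out : Option Int) : Decidable (Spec_infer_label_idx_py data_rows path_idx sample_size out) := by unfold Spec_infer_label_idx_py; infer_instance

-- ===== CLAIM (what is proved, stated in full; the proofs are below) =====
def Claim_equal_infer_label_idx_py : Prop := ∀ (data_rows : List (List String)) (path_idx : Int) (sample_size : Int), Dom_infer_label_idx_py data_rows path_idx sample_size → Spec_infer_label_idx_py data_rows path_idx sample_size (infer_label_idx_py data_rows path_idx sample_size)

-- ===== LEMMAS AND PROOFS =====

-- per-column step and accumulated state (proof-side characterization)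
def colStep (p : Bool × Bool) (row : List String) (c : Nat) : Bool × Bool :=
  if c < row.length then bStep p (row.getD c "") else p

def okRow (row : List String) (c : Nat) : Bool :=
  !(decide (c < row.length)) || PySem.Str.strip (row.getD c "") = "" ||
    labelNames.contains (PySem.Str.lower (PySem.Str.strip (row.getD c "")))

def hasRow (row : List String) (c : Nat) : Bool :=
  decide (c < row.length) && !(PySem.Str.strip (row.getD c "") = "")

theorem colStep_char (p : Bool × Bool) (row : List String) (c : Nat) :
    colStep p row c = (p.1 && okRow row c, p.2 || hasRow row c) := by
  unfold colStep okRow hasRow bStep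
  cases p with
  | mk a b =>
    by_cases h1 : c < row.length
    · rw [List.getD_eq_getElem _ _ h1]
      by_cases h2 : PySem.Str.strip row[c] = "" <;>
        simp [h1, h2]
    · simp [h1]

theorem foldl_colStep_char (sample : List (List String)) (c : Nat) (p : Bool × Bool) :
    sample.foldl (fun q row => colStep q row c) p
      = (p.1 && sample.all (fun row => okRow row c),
         p.2 || sample.any (fun row => hasRow row c)) := by
  induction sample generalizing p with
  | nil => simp
  | cons row rest ih =>
    rw [List.foldl_cons, ih, colStep_char]
    simp [Bool.and_assoc, Bool.or_assoc]

theorem bRow_length (row : List String) (i : Nat) (st : List (Bool × Bool)) :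
    (bRow st i row).length = st.length := by
  induction row generalizing i st with
  | nil => rfl
  | cons cell rest ih => simp [bRow, ih]

theorem bRow_getD (row : List String) (i : Nat) (st : List (Bool × Bool))
    (hw : i + row.length ≤ st.length) (c : Nat) (hc : c < st.length) :
    (bRow st i row).getD c (true, false)
      = if i ≤ c ∧ c < i + row.length then bStep (st.getD c (true, false)) (row.getD (c - i) "")
        else st.getD c (true, false) := by
  induction row generalizing i st with
  | nil =>
    simp only [bRow, List.length_nil, Nat.add_zero]
    rw [if_neg (by omega)]
  | cons cell rest ih =>
    simp only [bRow]
    simp only [List.length_cons] at hw ⊢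
    have hlen : i < st.length := by omega
    have hw' : (i + 1) + rest.length ≤ (st.set i (bStep (st.getD i (true, false)) cell)).length := by
      simp only [List.length_set]; omega
    rw [ih (i + 1) _ hw' (by simpa using hc)]
    by_cases hci : c = i
    · subst hci
      rw [if_neg (by omega), if_pos (by omega)]
      simp [List.getD_eq_getElem?_getD, List.getElem?_set_self hlen]
    · have hne : (st.set i (bStep (st.getD i (true, false)) cell)).getD c (true, false)
          = st.getD c (true, false) := by
        simp [List.getD_eq_getElem?_getD, List.getElem?_set_ne (by omega : i ≠ c)]
      by_cases hin : i + 1 ≤ c ∧ c < (i + 1) + rest.length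
      · rw [if_pos hin, if_pos (by omega), hne]
        have : c - i = (c - (i + 1)) + 1 := by omega
        rw [this]
        rfl
      · rw [if_neg hin, if_neg (by omega), hne]

theorem foldl_bRow_length (sample : List (List String)) (st : List (Bool × Bool)) :
    (sample.foldl (fun s row => bRow s 0 row) st).length = st.length := by
  induction sample generalizing st with
  | nil => rfl
  | cons row rest ih => rw [List.foldl_cons, ih, bRow_length]

theorem foldl_bRow_getD (sample : List (List String)) (st : List (Bool × Bool))
    (hw : ∀ row ∈ sample, row.length ≤ st.length) (c : Nat) (hc : c < st.length) :
    (sample.foldl (fun s row => bRow s 0 row) st).getD c (true, false)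
      = sample.foldl (fun q row => colStep q row c) (st.getD c (true, false)) := by
  induction sample generalizing st with
  | nil => rfl
  | cons row rest ih =>
    rw [List.foldl_cons, List.foldl_cons,
      ih (bRow st 0 row)
        (fun r hr => by rw [bRow_length]; exact hw r (List.mem_cons_of_mem _ hr))
        (by rw [bRow_length]; exact hc),
      bRow_getD row 0 st (by simpa using hw row List.mem_cons_self) c hc]
    simp only [Nat.zero_add, Nat.sub_zero, colStep]
    split_ifs with h1 h2 h3 <;> first | rfl | omega

theorem aValues_all (sample : List (List String)) (c : Nat) :
    (aValues sample c).all (fun v => labelNames.contains v)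
      = sample.all (fun row => okRow row c) := by
  induction sample with
  | nil => rfl
  | cons row rest ih =>
    by_cases h1 : c < row.length
    · by_cases h2 : PySem.Str.strip (row.getD c "") = ""
      · have h2' : PySem.Str.strip row[c] = "" := by
          rwa [List.getD_eq_getElem _ _ h1] at h2
        have hsplit : aValues (row :: rest) c = aValues rest c := by
          simp [aValues, h1, h2']
        rw [hsplit, ih, List.all_cons,
          show okRow row c = true from by simp [okRow, h1, h2'], Bool.true_and]
      · have h2' : ¬ PySem.Str.strip row[c] = "" := by
          rwa [List.getD_eq_getElem _ _ h1] at h2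
        have hsplit : aValues (row :: rest) c
            = PySem.Str.lower (PySem.Str.strip row[c]) :: aValues rest c := by
          simp [aValues, h1, h2']
        rw [hsplit, List.all_cons, List.all_cons, ih,
          show okRow row c = labelNames.contains (PySem.Str.lower (PySem.Str.strip row[c]))
            from by simp [okRow, h1, h2']]
    · have hsplit : aValues (row :: rest) c = aValues rest c := by
        simp [aValues, h1]
      rw [hsplit, ih, List.all_cons,
        show okRow row c = true from by simp [okRow, h1], Bool.true_and]

theorem aValues_isEmpty (sample : List (List String)) (c : Nat) :
    (aValues sample c).isEmpty = !(sample.any (fun row => hasRow row c)) := by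
  induction sample with
  | nil => rfl
  | cons row rest ih =>
    by_cases h1 : c < row.length
    · by_cases h2 : PySem.Str.strip (row.getD c "") = ""
      · have h2' : PySem.Str.strip row[c] = "" := by
          rwa [List.getD_eq_getElem _ _ h1] at h2
        have hsplit : aValues (row :: rest) c = aValues rest c := by
          simp [aValues, h1, h2']
        rw [hsplit, ih, List.any_cons,
          show hasRow row c = false from by simp [hasRow, h1, h2'], Bool.false_or]
      · have h2' : ¬ PySem.Str.strip row[c] = "" := by
          rwa [List.getD_eq_getElem _ _ h1] at h2
        have hsplit : aValues (row :: rest) c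
            = PySem.Str.lower (PySem.Str.strip row[c]) :: aValues rest c := by
          simp [aValues, h1, h2']
        rw [hsplit, List.any_cons,
          show hasRow row c = true from by simp [hasRow, h1, h2']]
        rfl
    · have hsplit : aValues (row :: rest) c = aValues rest c := by
        simp [aValues, h1]
      rw [hsplit, ih, List.any_cons,
        show hasRow row c = false from by simp [hasRow, h1], Bool.false_or]

theorem scan_eq (sample : List (List String)) (path_idx : Int) :
    ∀ (st : List (Bool × Bool)) (i : Nat),
    (∀ k, k < st.length →
      st.getD k (true, false)
        = (sample.all (fun row => okRow row (i + k)),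
           sample.any (fun row => hasRow row (i + k)))) →
    bFind path_idx i st = aScan sample path_idx (List.range' i st.length) := by
  intro st
  induction st with
  | nil => intro i _; rfl
  | cons p rest ih =>
    intro i hst
    obtain ⟨vld, hv⟩ := p
    have h0 := hst 0 (by simp)
    simp only [List.getD_cons_zero, Nat.add_zero] at h0
    have hvld : vld = sample.all (fun row => okRow row i) := by
      have := congrArg Prod.fst h0; simpa using this
    have hhv : hv = sample.any (fun row => hasRow row i) := by
      have := congrArg Prod.snd h0; simpa using this
    have hrec : bFind path_idx (i + 1) rest
        = aScan sample path_idx (List.range' (i + 1) rest.length) := by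
      apply ih
      intro k hk
      have := hst (k + 1) (by simpa using Nat.succ_lt_succ hk)
      simpa [Nat.add_assoc, Nat.add_comm 1 k, Nat.add_left_comm] using this
    simp only [List.length_cons, List.range'_succ]
    simp only [bFind, aScan]
    by_cases hp : (i : Int) = path_idx
    · simp [hp, hrec]
    · rw [if_neg hp]
      have hcond : (!(aValues sample i).isEmpty && (aValues sample i).all
          (fun v => labelNames.contains v)) = (hv && vld) := by
        rw [aValues_all, aValues_isEmpty, hvld, hhv]
        simp
      rw [hcond]
      have hne : ((i : Int) != path_idx) = true := by simp [hp]
      rw [hne]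
      simp only [Bool.true_and]
      split_ifs with hb
      · rfl
      · exact hrec

theorem le_foldl_max (sample : List (List String)) (row : List String) (h : row ∈ sample) (b : Nat) :
    row.length ≤ sample.foldl (fun m r => max m r.length) b := by
  induction sample generalizing b with
  | nil => cases h
  | cons r rest ih =>
    have init_le : ∀ (xs : List (List String)) (a : Nat),
        a ≤ xs.foldl (fun m r => max m r.length) a := by
      intro xs
      induction xs with
      | nil => intro a; exact Nat.le_refl a
      | cons x xt iht =>
        intro a
        exact Nat.le_trans (Nat.le_max_left a x.length) (iht (max a x.length))
    rcases List.mem_cons.mp h with h1 | h1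
    · subst h1
      exact Nat.le_trans (Nat.le_max_right b row.length) (init_le rest _)
    · exact ih h1 _

-- ===== VERDICT (by name: the statement is the Claim_ definition above) =====
theorem infer_label_idx_py_spec : Claim_equal_infer_label_idx_py := by
  intro data_rows path_idx sample_size _
  unfold Spec_infer_label_idx_py infer_label_idx_py infer_label_idx_py_alt
  simp only []
  set sample := PySem.List.slice data_rows none (some sample_size) with hs
  set w := sample.foldl (fun m row => max m row.length) 0 with hwdef
  set st := sample.foldl (fun s row => bRow s 0 row) (List.replicate w (true, false)) with hstdef
  have hwrow : ∀ row ∈ sample, row.length ≤ w := fun row hr => le_foldl_max sample row hr 0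
  have hlen : st.length = w := by
    rw [hstdef, foldl_bRow_length, List.length_replicate]
  have hmain := scan_eq sample path_idx st 0 ?_
  · rw [hlen] at hmain
    rw [List.range_eq_range']
    exact hmain.symm
  · intro k hk
    rw [hlen] at hk
    rw [hstdef, foldl_bRow_getD sample _
        (fun r hr => by rw [List.length_replicate]; exact hwrow r hr) k
        (by rwa [List.length_replicate])]
    rw [List.getD_eq_getElem _ _ (by rwa [List.length_replicate]), List.getElem_replicate]
    rw [foldl_colStep_char]
    simp
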